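-- pv_equiv track=rewrite | github.com/lacdr-tox/heldring_phh_code | Optimisation/odeFunctions.py | makeTextRunutAutowrap
-- ===== SOURCE A (Python) =====
-- def makeTextRunutAutowrap(autowrapName, doseparlistName, doselist, pkparlistName, pkparmList, withTimeDose = True):
--     # Make nwvarName
--     sText = autowrapName + "("
--     if len(doselist) > 1:
--         for i in range(0,len(doselist)-1):
--             sText = sText + doseparlistName + "[" + str(i) + "]" + ", "
--         sText = sText + doseparlistName + "[" + str(i+1) + "]"
--     elif len(doselist) == 1:
--         sText = sText + doseparlistName + "[0]"
--
--     if withTimeDose and len(doselist) > 0: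
--         sText = sText + ", t, dose"
--     elif withTimeDose and len(doselist) == 0:
--         sText = sText + "t, dose"
--
--     if len(pkparmList) > 1:
--         for i in range(0, len(pkparmList) - 1):
--             sText = sText + ", " + pkparlistName + "[" + str(i) + "]"
--         sText = sText + ", " + pkparlistName + "[" + str(i + 1) + "]" + ")"
--     elif len(pkparmList) == 1:
--         sText = sText + ", " + pkparlistName + "[0]" + ")"
--     else:
--         sText = sText + ")"
--
--     return sText
-- ===== SOURCE B (Python) =====
-- def makeTextRunutAutowrap(autowrapName, doseparlistName, doselist, pkparlistName, pkparmList, withTimeDose = True):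
--     tokens = [f"{doseparlistName}[{i}]" for i in range(len(doselist))]
--     if withTimeDose:
--         tokens += ["t", "dose"]
--     tokens += [f"{pkparlistName}[{i}]" for i in range(len(pkparmList))]
--     return autowrapName + "(" + ", ".join(tokens) + ")"
-- ===== Notes on version B (the rewrite author's own statement) =====
-- stated objective: simpler
-- what changed: Replaces A's four comma/branch special-cased string-append blocks by building one uniform token list and joining it once with ', ', removing the quadratic repeated concatenation.
-- intended difference: When doselist is empty, withTimeDose is False and pkparmList is non-empty, A unconditionally prepends ', ' before the first pk token and returns e.g. 'n(, p[0])'; B returns the intended well-formed call 'n(p[0])' with no spurious leading comma. — e.g. on makeTextRunutAutowrap("n", "d", [], "p", ["x"], false): A returns "n(, p[0])", B returns "n(p[0])"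
import Mathlib
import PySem

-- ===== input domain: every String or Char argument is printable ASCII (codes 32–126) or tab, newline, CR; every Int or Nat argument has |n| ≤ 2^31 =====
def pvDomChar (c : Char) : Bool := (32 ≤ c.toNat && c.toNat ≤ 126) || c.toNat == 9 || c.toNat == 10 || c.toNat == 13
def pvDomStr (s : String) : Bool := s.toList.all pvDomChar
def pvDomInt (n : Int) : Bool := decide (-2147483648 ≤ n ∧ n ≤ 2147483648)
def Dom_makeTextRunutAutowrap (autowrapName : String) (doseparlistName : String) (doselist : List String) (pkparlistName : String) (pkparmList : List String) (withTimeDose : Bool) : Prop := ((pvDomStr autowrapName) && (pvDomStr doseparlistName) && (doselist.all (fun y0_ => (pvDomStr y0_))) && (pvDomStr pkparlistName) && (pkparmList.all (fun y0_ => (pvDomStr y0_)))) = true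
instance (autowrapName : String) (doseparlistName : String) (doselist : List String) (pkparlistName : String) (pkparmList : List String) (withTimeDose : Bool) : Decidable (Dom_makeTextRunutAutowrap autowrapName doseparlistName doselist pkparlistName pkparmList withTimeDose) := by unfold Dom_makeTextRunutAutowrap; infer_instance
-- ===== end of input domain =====

-- B builds one uniform token list and joins it with ", " (simpler decomposition); on the corner
-- doselist = [] ∧ withTimeDose = False ∧ pkparmList ≠ [] A emits a spurious leading ", " and B
-- intentionally does not (stated as D_ below).

-- ===== PORT A =====
def makeTextRunutAutowrap (autowrapName : String) (doseparlistName : String) (doselist : List String) (pkparlistName : String) (pkparmList : List String) (withTimeDose : Bool) : String :=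
  let sText := autowrapName ++ "("
  let sText :=
    if doselist.length > 1 then
      let s1 := (PySem.List.pyRange 0 ((doselist.length : Int) - 1) 1).foldl
        (fun s i => s ++ doseparlistName ++ "[" ++ PySem.Int.toStr i ++ "]" ++ ", ") sText
      -- Python reuses the leftover loop variable i = len(doselist) - 2 after the loop
      s1 ++ doseparlistName ++ "[" ++ PySem.Int.toStr (((doselist.length : Int) - 2) + 1) ++ "]"
    else if doselist.length = 1 then
      sText ++ doseparlistName ++ "[0]"
    else sText
  let sText :=
    if withTimeDose && decide (doselist.length > 0) then sText ++ ", t, dose"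
    else if withTimeDose && decide (doselist.length = 0) then sText ++ "t, dose"
    else sText
  if pkparmList.length > 1 then
    let s2 := (PySem.List.pyRange 0 ((pkparmList.length : Int) - 1) 1).foldl
      (fun s i => s ++ ", " ++ pkparlistName ++ "[" ++ PySem.Int.toStr i ++ "]") sText
    s2 ++ ", " ++ pkparlistName ++ "[" ++ PySem.Int.toStr (((pkparmList.length : Int) - 2) + 1) ++ "]" ++ ")"
  else if pkparmList.length = 1 then
    sText ++ ", " ++ pkparlistName ++ "[0]" ++ ")"
  else
    sText ++ ")"

-- ===== PORT B =====
def makeTextRunutAutowrap_alt (autowrapName : String) (doseparlistName : String) (doselist : List String) (pkparlistName : String) (pkparmList : List String) (withTimeDose : Bool) : String :=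
  let tokens := (PySem.List.pyRange 0 (doselist.length : Int) 1).map
    (fun i => doseparlistName ++ "[" ++ PySem.Int.toStr i ++ "]")
  let tokens := if withTimeDose then tokens ++ ["t", "dose"] else tokens
  let tokens := tokens ++ (PySem.List.pyRange 0 (pkparmList.length : Int) 1).map
    (fun i => pkparlistName ++ "[" ++ PySem.Int.toStr i ++ "]")
  autowrapName ++ "(" ++ PySem.Str.join ", " tokens ++ ")"

-- ===== PRECONDITION & SPEC =====
-- When doselist is empty, withTimeDose is False and pkparmList is non-empty, A unconditionally
-- prepends ", " before the first pk token (e.g. "n(, p[0])"); B returns the intended well-formed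
-- call "n(p[0])" with no spurious leading comma.
def D_makeTextRunutAutowrap (autowrapName : String) (doseparlistName : String) (doselist : List String) (pkparlistName : String) (pkparmList : List String) (withTimeDose : Bool) : Prop :=
  doselist = [] ∧ withTimeDose = false ∧ pkparmList ≠ []
instance (autowrapName : String) (doseparlistName : String) (doselist : List String) (pkparlistName : String) (pkparmList : List String) (withTimeDose : Bool) : Decidable (D_makeTextRunutAutowrap autowrapName doseparlistName doselist pkparlistName pkparmList withTimeDose) := by unfold D_makeTextRunutAutowrap; infer_instance

def Spec_makeTextRunutAutowrap (autowrapName : String) (doseparlistName : String) (doselist : List String) (pkparlistName : String) (pkparmList : List String) (withTimeDose : Bool) (out : String) : Prop := ¬ D_makeTextRunutAutowrap autowrapName doseparlistName doselist pkparlistName pkparmList withTimeDose → out = makeTextRunutAutowrap_alt autowrapName doseparlistName doselist pkparlistName pkparmList withTimeDose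
instance (autowrapName : String) (doseparlistName : String) (doselist : List String) (pkparlistName : String) (pkparmList : List String) (withTimeDose : Bool) (out : String) : Decidable (Spec_makeTextRunutAutowrap autowrapName doseparlistName doselist pkparlistName pkparmList withTimeDose out) := by unfold Spec_makeTextRunutAutowrap; infer_instance

def pvDiffWitness_makeTextRunutAutowrap : String × String × List String × String × List String × Bool :=
  ("n", "d", [], "p", ["x"], false)
def pvDiffWitnessOut_makeTextRunutAutowrap : String × String := ("n(, p[0])", "n(p[0])")

-- ===== CLAIM (what is proved, stated in full; the proofs are below) =====
def Claim_unchanged_makeTextRunutAutowrap : Prop := ∀ (autowrapName : String) (doseparlistName : String) (doselist : List String) (pkparlistName : String) (pkparmList : List String) (withTimeDose : Bool), Dom_makeTextRunutAutowrap autowrapName doseparlistName doselist pkparlistName pkparmList withTimeDose → Spec_makeTextRunutAutowrap autowrapName doseparlistName doselist pkparlistName pkparmList withTimeDose (makeTextRunutAutowrap autowrapName doseparlistName doselist pkparlistName pkparmList withTimeDose)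
def Claim_changed_makeTextRunutAutowrap : Prop := Dom_makeTextRunutAutowrap (pvDiffWitness_makeTextRunutAutowrap.1) (pvDiffWitness_makeTextRunutAutowrap.2.1) (pvDiffWitness_makeTextRunutAutowrap.2.2.1) (pvDiffWitness_makeTextRunutAutowrap.2.2.2.1) (pvDiffWitness_makeTextRunutAutowrap.2.2.2.2.1) (pvDiffWitness_makeTextRunutAutowrap.2.2.2.2.2) ∧ D_makeTextRunutAutowrap (pvDiffWitness_makeTextRunutAutowrap.1) (pvDiffWitness_makeTextRunutAutowrap.2.1) (pvDiffWitness_makeTextRunutAutowrap.2.2.1) (pvDiffWitness_makeTextRunutAutowrap.2.2.2.1) (pvDiffWitness_makeTextRunutAutowrap.2.2.2.2.1) (pvDiffWitness_makeTextRunutAutowrap.2.2.2.2.2) ∧ makeTextRunutAutowrap (pvDiffWitness_makeTextRunutAutowrap.1) (pvDiffWitness_makeTextRunutAutowrap.2.1) (pvDiffWitness_makeTextRunutAutowrap.2.2.1) (pvDiffWitness_makeTextRunutAutowrap.2.2.2.1) (pvDiffWitness_makeTextRunutAutowrap.2.2.2.2.1) (pvDiffWitness_makeTextRunutAutowrap.2.2.2.2.2)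 = pvDiffWitnessOut_makeTextRunutAutowrap.1 ∧ makeTextRunutAutowrap_alt (pvDiffWitness_makeTextRunutAutowrap.1) (pvDiffWitness_makeTextRunutAutowrap.2.1) (pvDiffWitness_makeTextRunutAutowrap.2.2.1) (pvDiffWitness_makeTextRunutAutowrap.2.2.2.1) (pvDiffWitness_makeTextRunutAutowrap.2.2.2.2.1) (pvDiffWitness_makeTextRunutAutowrap.2.2.2.2.2) = pvDiffWitnessOut_makeTextRunutAutowrap.2 ∧ pvDiffWitnessOut_makeTextRunutAutowrap.1 ≠ pvDiffWitnessOut_makeTextRunutAutowrap.2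
def Claim_exact_makeTextRunutAutowrap : Prop := ∀ (autowrapName : String) (doseparlistName : String) (doselist : List String) (pkparlistName : String) (pkparmList : List String) (withTimeDose : Bool), Dom_makeTextRunutAutowrap autowrapName doseparlistName doselist pkparlistName pkparmList withTimeDose → D_makeTextRunutAutowrap autowrapName doseparlistName doselist pkparlistName pkparmList withTimeDose → makeTextRunutAutowrap autowrapName doseparlistName doselist pkparlistName pkparmList withTimeDose ≠ makeTextRunutAutowrap_alt autowrapName doseparlistName doselist pkparlistName pkparmList withTimeDose

-- ===== LEMMAS AND PROOFS =====

-- glue ts = the string ", x1, x2…" of ts's tokens each preceded by ", " (proof-side helper)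
def pvGlue : List String → String
  | [] => ""
  | x :: ts => ", " ++ x ++ pvGlue ts

theorem pvGlue_append (a b : List String) : pvGlue (a ++ b) = pvGlue a ++ pvGlue b := by
  induction a with
  | nil => simp [pvGlue, String.empty_append]
  | cons x a ih => simp [pvGlue, ih, String.append_assoc]

theorem pvJoin_cons (x : String) (ts : List String) :
    PySem.Str.join ", " (x :: ts) = x ++ pvGlue ts := by
  induction ts generalizing x with
  | nil =>
      apply String.toList_inj.mp
      simp [PySem.Str.join, PySem.Chars.join_singleton, pvGlue, String.append_empty]
  | cons y ts ih =>
      have h : PySem.Str.join ", " (x :: y :: ts) = x ++ ", " ++ PySem.Str.join ", " (y :: ts) := by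
        apply String.toList_inj.mp
        simp [PySem.Str.join, PySem.Chars.join_cons_cons, String.toList_append]
      rw [h, ih, pvGlue, String.append_assoc, String.append_assoc]

theorem pvComma_join (x : String) (ts : List String) :
    ", " ++ PySem.Str.join ", " (x :: ts) = pvGlue (x :: ts) := by
  rw [pvJoin_cons, pvGlue, String.append_assoc]

theorem pvJoin_glue (x : String) (ts us : List String) :
    PySem.Str.join ", " (x :: ts) ++ pvGlue us = PySem.Str.join ", " ((x :: ts) ++ us) := by
  simp [pvJoin_cons, pvGlue_append, String.append_assoc]

theorem pvFoldl_glue (l : List Int) (f : Int → String) (s0 : String) :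
    l.foldl (fun s i => s ++ ", " ++ f i) s0 = s0 ++ pvGlue (l.map f) := by
  induction l generalizing s0 with
  | nil => simp [pvGlue, String.append_empty]
  | cons i l ih => rw [List.foldl_cons, ih, List.map_cons, pvGlue]; simp [String.append_assoc]

theorem pvFoldl_dose (l : List Int) (f : Int → String) (m : Int) (s0 : String) :
    l.foldl (fun s i => s ++ f i ++ ", ") s0 ++ f m
      = s0 ++ PySem.Str.join ", " ((l ++ [m]).map f) := by
  induction l generalizing s0 with
  | nil =>
      rw [List.foldl_nil, List.nil_append, List.map_cons, List.map_nil, pvJoin_cons, pvGlue,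
        String.append_empty]
  | cons i l ih =>
      rw [List.foldl_cons, ih, List.cons_append, List.map_cons]
      have hne : (l ++ [m]).map f ≠ [] := by simp
      obtain ⟨y, ys, hy⟩ := List.exists_cons_of_ne_nil hne
      rw [hy, pvJoin_cons, pvJoin_cons, pvGlue]
      simp [String.append_assoc]

-- the port's pyRange bound rewritten one step up, so the last dose/pk token joins the list
theorem pvRange_split (n : Nat) (h : 1 ≤ n) :
    PySem.List.pyRange 0 ((n : Int)) 1
      = PySem.List.pyRange 0 ((n : Int) - 1) 1 ++ [(n : Int) - 1] := by
  have := PySem.List.pyRange_one_succ_right (a := 0) (b := (n : Int) - 1) (by omega)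
  simpa using this

-- closed form of A's dose loop plus its trailing token (uses Python's leftover i = n-2)
theorem pvDoseClosed (d s0 : String) (n : Nat) (h : 1 < n) :
    List.foldl (fun s i => s ++ d ++ "[" ++ PySem.Int.toStr i ++ "]" ++ ", ") s0
        (PySem.List.pyRange 0 ((n : Int) - 1)) ++ d ++ "[" ++ PySem.Int.toStr ((n : Int) - 2 + 1) ++ "]"
      = s0 ++ PySem.Str.join ", "
          (List.map (fun i => d ++ "[" ++ PySem.Int.toStr i ++ "]") (PySem.List.pyRange 0 (n : Int))) := by
  have hm : ((n : Int) - 2) + 1 = (n : Int) - 1 := by ring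
  have key := pvFoldl_dose (PySem.List.pyRange 0 ((n : Int) - 1))
    (fun i => d ++ "[" ++ PySem.Int.toStr i ++ "]") ((n : Int) - 1) s0
  rw [← pvRange_split n (by omega)] at key
  rw [hm]
  simp only [String.append_assoc] at key ⊢
  exact key

-- closed form of A's pk if/elif/else block, for any already-built prefix
theorem pvRight (p pre : String) (pk : List String) :
    (if pk.length > 1 then
        List.foldl (fun s i => s ++ ", " ++ p ++ "[" ++ PySem.Int.toStr i ++ "]") pre
            (PySem.List.pyRange 0 ((pk.length : Int) - 1)) ++ ", " ++ p ++
            "[" ++ PySem.Int.toStr ((pk.length : Int) - 2 + 1) ++ "]" ++ ")"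
      else if pk.length = 1 then pre ++ ", " ++ p ++ "[0]" ++ ")"
      else pre ++ ")")
    = pre ++ pvGlue (List.map (fun i => p ++ "[" ++ PySem.Int.toStr i ++ "]")
        (PySem.List.pyRange 0 (pk.length : Int))) ++ ")" := by
  have h0 : PySem.Int.toStr 0 = "0" := by decide
  by_cases k2 : 1 < pk.length
  · rw [if_pos k2]
    have hm : ((pk.length : Int) - 2) + 1 = (pk.length : Int) - 1 := by ring
    have hfun : (fun (s : String) (i : Int) => s ++ ", " ++ p ++ "[" ++ PySem.Int.toStr i ++ "]")
        = (fun s i => s ++ ", " ++ (p ++ "[" ++ PySem.Int.toStr i ++ "]")) := by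
      funext s i; simp [String.append_assoc]
    rw [hm, hfun, pvFoldl_glue (f := fun i => p ++ "[" ++ PySem.Int.toStr i ++ "]")]
    rw [pvRange_split pk.length (by omega), List.map_append, pvGlue_append]
    simp [pvGlue, String.append_assoc]
  · by_cases k1 : pk.length = 1
    · rw [if_neg k2, if_pos k1]
      have hc : (pk.length : Int) = 1 := by exact_mod_cast k1
      rw [hc]
      have hs : PySem.List.pyRange 0 (1 : Int) = [0] := by decide
      rw [hs]
      simp [pvGlue, String.append_assoc, h0]
    · rw [if_neg k2, if_neg k1]
      have hc : (pk.length : Int) = 0 := by omega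
      rw [hc]
      have hs : PySem.List.pyRange 0 (0 : Int) = [] := by decide
      rw [hs]
      simp [pvGlue, String.append_assoc]

-- joining the two literal time/dose tokens onto a non-empty token list
theorem pvTDose (TD : List String) (h : TD ≠ []) :
    PySem.Str.join ", " TD ++ ", t, dose" = PySem.Str.join ", " (TD ++ ["t", "dose"]) := by
  obtain ⟨x, ts, rfl⟩ := List.exists_cons_of_ne_nil h
  rw [List.cons_append, pvJoin_cons, pvJoin_cons, pvGlue_append]
  have hg : pvGlue ["t", "dose"] = ", t, dose" := by decide
  rw [hg]
  simp [String.append_assoc]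

theorem pvTD_ne (d : String) (ds : List String) (h : ds ≠ []) :
    List.map (fun i => d ++ "[" ++ PySem.Int.toStr i ++ "]") (PySem.List.pyRange 0 (ds.length : Int)) ≠ [] := by
  have hpos : (0 : Int) < (ds.length : Int) := by
    cases ds with
    | nil => exact absurd rfl h
    | cons y ys => simp
  rw [PySem.List.pyRange_one_cons hpos]
  simp

-- closed form of A's dose block followed by the time/dose block
theorem pvLeft (a d : String) (ds : List String) (w : Bool) (h : ds ≠ [] ∨ w = true) :
    (if (w && decide (ds.length > 0)) = true then
        (if ds.length > 1 then
            List.foldl (fun s i => s ++ d ++ "[" ++ PySem.Int.toStr i ++ "]" ++ ", ") (a ++ "(")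
                (PySem.List.pyRange 0 ((ds.length : Int) - 1)) ++ d ++
                "[" ++ PySem.Int.toStr ((ds.length : Int) - 2 + 1) ++ "]"
          else if ds.length = 1 then a ++ "(" ++ d ++ "[0]" else a ++ "(") ++ ", t, dose"
      else if (w && decide (ds.length = 0)) = true then
        (if ds.length > 1 then
            List.foldl (fun s i => s ++ d ++ "[" ++ PySem.Int.toStr i ++ "]" ++ ", ") (a ++ "(")
                (PySem.List.pyRange 0 ((ds.length : Int) - 1)) ++ d ++
                "[" ++ PySem.Int.toStr ((ds.length : Int) - 2 + 1) ++ "]"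
          else if ds.length = 1 then a ++ "(" ++ d ++ "[0]" else a ++ "(") ++ "t, dose"
      else
        if ds.length > 1 then
          List.foldl (fun s i => s ++ d ++ "[" ++ PySem.Int.toStr i ++ "]" ++ ", ") (a ++ "(")
              (PySem.List.pyRange 0 ((ds.length : Int) - 1)) ++ d ++
              "[" ++ PySem.Int.toStr ((ds.length : Int) - 2 + 1) ++ "]"
        else if ds.length = 1 then a ++ "(" ++ d ++ "[0]" else a ++ "(")
    = a ++ "(" ++ PySem.Str.join ", "
        (if w = true then
            List.map (fun i => d ++ "[" ++ PySem.Int.toStr i ++ "]")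
                (PySem.List.pyRange 0 (ds.length : Int)) ++ ["t", "dose"]
          else
            List.map (fun i => d ++ "[" ++ PySem.Int.toStr i ++ "]")
                (PySem.List.pyRange 0 (ds.length : Int))) := by
  have h0 : PySem.Int.toStr 0 = "0" := by decide
  cases w with
  | false =>
      have hds : ds ≠ [] := by
        rcases h with h | h
        · exact h
        · exact absurd h (by simp)
      have hpos : 0 < ds.length := List.length_pos_of_ne_nil hds
      simp only [Bool.false_and, Bool.false_eq_true, if_false]
      by_cases h2 : ds.length > 1
      · rw [if_pos h2, pvDoseClosed d (a ++ "(") ds.length h2]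
      · have h1 : ds.length = 1 := by omega
        rw [if_neg h2, if_pos h1]
        have hc : (ds.length : Int) = 1 := by exact_mod_cast h1
        rw [hc]
        have hs : PySem.List.pyRange 0 (1 : Int) = [0] := by decide
        rw [hs, List.map_cons, List.map_nil, pvJoin_cons]
        simp [pvGlue, String.append_assoc, h0]
  | true =>
      simp only [Bool.true_and, decide_eq_true_eq, if_true]
      by_cases h2 : ds.length > 1
      · rw [if_pos (show ds.length > 0 by omega), if_pos h2,
          pvDoseClosed d (a ++ "(") ds.length h2]
        rw [← pvTDose _ (pvTD_ne d ds (by intro hc; subst hc; simp at h2))]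
        simp [String.append_assoc]
      · by_cases h1 : ds.length = 1
        · rw [if_pos (show ds.length > 0 by omega), if_neg h2, if_pos h1]
          have hc : (ds.length : Int) = 1 := by exact_mod_cast h1
          rw [hc]
          have hs : PySem.List.pyRange 0 (1 : Int) = [0] := by decide
          rw [hs, List.map_cons, List.map_nil]
          simp only [List.cons_append, List.nil_append]
          rw [pvJoin_cons]
          have hg : pvGlue ["t", "dose"] = ", t, dose" := by decide
          rw [hg]
          simp [String.append_assoc, h0]
        · have h00 : ds.length = 0 := by omega
          rw [if_neg (show ¬ ds.length > 0 by omega), if_pos h00, if_neg h2, if_neg h1]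
          have hc : (ds.length : Int) = 0 := by omega
          rw [hc]
          have hs : PySem.List.pyRange 0 (0 : Int) = [] := by decide
          rw [hs, List.map_nil, List.nil_append]
          have hj : PySem.Str.join ", " ["t", "dose"] = "t, dose" := by decide
          rw [hj]

-- gluing the pk tail onto a non-empty joined token list is joining the concatenation
theorem pvAssemble (a : String) (LT TP : List String) (h : LT ≠ []) :
    a ++ "(" ++ PySem.Str.join ", " LT ++ pvGlue TP ++ ")"
      = a ++ "(" ++ PySem.Str.join ", " (LT ++ TP) ++ ")" := by
  obtain ⟨x, ts, rfl⟩ := List.exists_cons_of_ne_nil h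
  rw [← pvJoin_glue]
  simp [String.append_assoc]

theorem makeTextRunutAutowrap_spec : Claim_unchanged_makeTextRunutAutowrap := by
  intro a d ds p pk w _hdom hnD
  show makeTextRunutAutowrap a d ds p pk w = makeTextRunutAutowrap_alt a d ds p pk w
  simp only [makeTextRunutAutowrap, makeTextRunutAutowrap_alt]
  rw [pvRight]
  by_cases hL : ds = [] ∧ w = false
  · obtain ⟨rfl, rfl⟩ := hL
    have hpk : pk = [] := by
      by_contra hne
      exact hnD ⟨rfl, rfl, hne⟩
    subst hpk
    have hs : PySem.List.pyRange 0 (0 : Int) = [] := by decide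
    have hj : PySem.Str.join ", " ([] : List String) = "" := by decide
    simp [hs, hj, pvGlue, String.append_assoc]
  · have h : ds ≠ [] ∨ w = true := by
      cases w with
      | false => exact Or.inl (fun hds => hL ⟨hds, rfl⟩)
      | true => exact Or.inr rfl
    rw [pvLeft a d ds w h]
    have hne : (if w = true then
        List.map (fun i => d ++ "[" ++ PySem.Int.toStr i ++ "]")
            (PySem.List.pyRange 0 (ds.length : Int)) ++ ["t", "dose"]
      else
        List.map (fun i => d ++ "[" ++ PySem.Int.toStr i ++ "]")
            (PySem.List.pyRange 0 (ds.length : Int))) ≠ [] := by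
      cases w with
      | false =>
          simp only [Bool.false_eq_true, if_false]
          exact pvTD_ne d ds (h.resolve_right (by simp))
      | true => simp
    exact pvAssemble a _ _ hne

theorem makeTextRunutAutowrap_changed : Claim_changed_makeTextRunutAutowrap := by
  unfold Claim_changed_makeTextRunutAutowrap; decide

theorem makeTextRunutAutowrap_tight : Claim_exact_makeTextRunutAutowrap := by
  intro a d ds p pk w _hdom hD hEq
  obtain ⟨rfl, rfl, hpk⟩ := hD
  simp only [makeTextRunutAutowrap, makeTextRunutAutowrap_alt] at hEq
  rw [pvRight] at hEq
  simp only [List.length_nil, Nat.cast_zero, Bool.false_and, Bool.false_eq_true, if_false] at hEq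
  rw [if_neg (show ¬ (0 : Nat) > 1 from by omega),
    if_neg (show ¬ (0 : Nat) = 1 from by omega)] at hEq
  have hs : PySem.List.pyRange 0 (0 : Int) = [] := by decide
  rw [hs, List.map_nil, List.nil_append] at hEq
  have hpos : (0 : Int) < (pk.length : Int) := by
    cases pk with
    | nil => exact absurd rfl hpk
    | cons y ys => simp
  rw [PySem.List.pyRange_one_cons hpos, List.map_cons, ← pvComma_join] at hEq
  have hlen := congrArg String.length hEq
  have hc2 : (", " : String).length = 2 := by decide
  simp [String.length_append, hc2] at hlen
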